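-- pv_equiv track=rewrite | github.com/Jun12aid/Coding-Ninja | Favourite_singer.py | fav_count
-- ===== SOURCE A (Python) =====
-- def fav_count(n,inputt):
--     sing_count = {}
--     for i in inputt:
--         if i in sing_count:
--             sing_count[i]+=1
--         else:
--             sing_count[i] = 1
--
--     max_count = max(sing_count.values())
--     favorite_singers_count = sum(1 for count in sing_count.values() if  count == max_count)
--     return favorite_singers_count
-- ===== SOURCE B (Python) =====
-- def fav_count(n, inputt):
--     s = sorted(inputt)
--     runs = []
--     cur = 0
--     prev = None
--     for x in s:
--         if cur > 0 and prev == x: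
--             cur += 1
--         else:
--             if cur > 0:
--                 runs.append(cur)
--             cur = 1
--             prev = x
--     if cur > 0:
--         runs.append(cur)
--     m = max(runs)
--     return runs.count(m)
-- ===== Notes on version B (the rewrite author's own statement) =====
-- stated objective: alternative
-- what changed: Replaces the dict-of-counts (Counter-style loop plus two passes over its values) by sorting a copy of the list and scanning it once for run lengths, then taking the maximum run length and counting runs of that length.
import Mathlib
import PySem

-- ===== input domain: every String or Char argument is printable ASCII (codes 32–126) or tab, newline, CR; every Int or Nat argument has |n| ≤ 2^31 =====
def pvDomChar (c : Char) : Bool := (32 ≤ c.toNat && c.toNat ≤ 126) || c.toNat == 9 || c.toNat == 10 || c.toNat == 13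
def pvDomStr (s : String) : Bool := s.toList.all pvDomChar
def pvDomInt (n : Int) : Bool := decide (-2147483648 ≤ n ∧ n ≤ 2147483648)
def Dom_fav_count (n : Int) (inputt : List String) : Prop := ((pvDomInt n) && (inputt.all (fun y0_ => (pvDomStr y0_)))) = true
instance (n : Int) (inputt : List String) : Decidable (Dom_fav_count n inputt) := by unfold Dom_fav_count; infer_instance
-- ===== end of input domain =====

-- B replaces A's dict-of-counts (and its two passes over the values) by sorting a copy of the list
-- and scanning it once for run lengths (alternative algorithm, similar cost); neither version mutates its argument.

-- ===== PORT A =====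
def fav_count (n : Int) (inputt : List String) : Int :=
  let sing_count : PySem.Dict String Int :=
    inputt.foldl
      (fun d i => if d.contains i then d.insert i (d.getD i 0 + 1) else d.insert i 1)
      PySem.Dict.empty
  match PySem.List.max? sing_count.values (fun x => x) with
  | none => 0  -- unreachable under Pre_ (max() of an empty sequence raises ValueError)
  | some max_count => (sing_count.values.map (fun count => if count = max_count then (1 : Int) else 0)).sum

-- ===== PORT B =====
-- loop state: (runs appended so far, current run length, previous element)
def favStep (st : List Int × Int × Option String) (x : String) : List Int × Int × Option String :=
  if 0 < st.2.1 ∧ st.2.2 = some x then (st.1, st.2.1 + 1, st.2.2)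
  else ((if 0 < st.2.1 then st.1 ++ [st.2.1] else st.1), 1, some x)

def fav_count_alt (n : Int) (inputt : List String) : Int :=
  let s := PySem.List.sorted inputt (fun x => x) false
  let st := s.foldl favStep ([], 0, none)
  let runs := if 0 < st.2.1 then st.1 ++ [st.2.1] else st.1
  match PySem.List.max? runs (fun x => x) with
  | none => 0  -- unreachable under Pre_ (max() of an empty sequence raises ValueError)
  | some m => (runs.count m : Int)

-- ===== PRECONDITION & SPEC =====
-- On inputt = [] both A and B raise ValueError (max() of an empty sequence), so Pre_ excludes exactly the empty list.
def Pre_fav_count (n : Int) (inputt : List String) : Prop := inputt ≠ []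
instance (n : Int) (inputt : List String) : Decidable (Pre_fav_count n inputt) := by unfold Pre_fav_count; infer_instance
def pvWitness_fav_count : Int × List String := (0, ["a"])

def Spec_fav_count (n : Int) (inputt : List String) (out : Int) : Prop := out = fav_count_alt n inputt
instance (n : Int) (inputt : List String) (out : Int) : Decidable (Spec_fav_count n inputt out) := by unfold Spec_fav_count; infer_instance

-- ===== CLAIM (what is proved, stated in full; the proofs are below) =====
def Claim_equal_fav_count : Prop := ∀ (n : Int) (inputt : List String), Dom_fav_count n inputt → Pre_fav_count n inputt → Spec_fav_count n inputt (fav_count n inputt)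

-- ===== LEMMAS AND PROOFS =====

-- A's dict loop is Counter(inputt)
lemma favA_dict_eq_counter (inputt : List String) :
    inputt.foldl
      (fun d i => if d.contains i then d.insert i (d.getD i 0 + 1) else d.insert i 1)
      PySem.Dict.empty = PySem.Dict.counter inputt := by
  rw [← PySem.Dict.foldl_insert_getD_add_one_eq_counter]
  apply PySem.List.foldl_congr_mem
  intro d x _
  by_cases h : d.contains x
  · simp [h]
  · rw [PySem.Dict.getD_of_not_contains (h := by simpa using h)]; simp [h]

-- A's values list: one count per distinct element, in first-occurrence order
lemma favA_values (inputt : List String) :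
    (PySem.Dict.counter inputt).values
      = (PySem.Set.ofList inputt).map (fun k => (inputt.count k : Int)) := by
  rw [PySem.Dict.values_eq_map_keys _ (PySem.Dict.nodup_keys_counter _) 0]
  rw [PySem.Dict.keys_counter]
  exact List.map_congr_left (fun x _ => PySem.Dict.getD_counter _ _)

-- Set.ofList helpers
lemma foldl_add_cons (l : List String) (s : List String) (y : String)
    (h : ∀ x ∈ l, x ≠ y) :
    l.foldl PySem.Set.add (y :: s) = y :: l.foldl PySem.Set.add s := by
  induction l generalizing s with
  | nil => rfl
  | cons x xs ih =>
    have hxy : x ≠ y := h x (by simp)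
    have hstep : PySem.Set.add (y :: s) x = y :: PySem.Set.add s x := by
      simp [PySem.Set.add, PySem.Set.contains, hxy]
      split_ifs <;> simp
    simp only [List.foldl_cons, hstep]
    exact ih _ (fun z hz => h z (by simp [hz]))

lemma foldl_add_filter (l : List String) (s : List String) (y : String) (hy : y ∈ s) :
    l.foldl PySem.Set.add s = (l.filter (fun x => x ≠ y)).foldl PySem.Set.add s := by
  induction l generalizing s with
  | nil => rfl
  | cons x xs ih =>
    by_cases hxy : x = y
    · subst hxy
      have hx : PySem.Set.add s x = s := by simp [PySem.Set.add, PySem.Set.contains, hy]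
      simp [hx, ih s hy]
    · have hmem : y ∈ PySem.Set.add s x := by
        simp [PySem.Set.add]; split_ifs <;> simp [hy]
      simp [hxy, ih _ hmem]

lemma ofList_cons (y : String) (ys : List String) :
    PySem.Set.ofList (y :: ys) = y :: PySem.Set.ofList (ys.filter (fun x => x ≠ y)) := by
  rw [PySem.Set.ofList_eq_foldl, PySem.Set.ofList_eq_foldl]
  show List.foldl PySem.Set.add (PySem.Set.add [] y) ys = _
  have h1 : PySem.Set.add ([] : List String) y = [y] := rfl
  rw [h1, foldl_add_filter ys [y] y (by simp)]
  exact foldl_add_cons _ [] y (fun x hx => by simpa using (List.of_mem_filter hx))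

def finishRuns (st : List Int × Int × Option String) : List Int :=
  if 0 < st.2.1 then st.1 ++ [st.2.1] else st.1

lemma tail_map_count (y : String) (ys : List String) :
    (PySem.Set.ofList (ys.filter (fun x => x ≠ y))).map (fun x => ((y :: ys).count x : Int))
      = (PySem.Set.ofList (ys.filter (fun x => x ≠ y))).map (fun x => (ys.count x : Int)) := by
  apply List.map_congr_left
  intro x hx
  have hxne : x ≠ y := by
    have := List.of_mem_filter ((PySem.Set.mem_ofList _ _).mp hx)
    simpa using this
  simp [Ne.symm hxne]

-- B's loop over a sorted suffix, with a pending run of p of length k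
lemma favB_go (l : List String) (p : String) (runs : List Int) (k : Int) (hk : 0 < k)
    (hs : l.Pairwise (· ≤ ·)) (hp : ∀ y ∈ l, p ≤ y) :
    finishRuns (l.foldl favStep (runs, k, some p)) =
      runs ++ (k + (l.count p : Int))
        :: (PySem.Set.ofList (l.filter (fun x => x ≠ p))).map (fun x => (l.count x : Int)) := by
  induction l generalizing p runs k with
  | nil => simp [finishRuns, hk]
  | cons y ys ih =>
    have hyle : ∀ z ∈ ys, y ≤ z := (List.pairwise_cons.mp hs).1
    rw [List.foldl_cons]
    by_cases hyp : y = p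
    · subst hyp
      have hstep : favStep (runs, k, some y) y = (runs, k + 1, some y) := by
        simp [favStep, hk]
      have hfil : (y :: ys).filter (fun x => x ≠ y) = ys.filter (fun x => x ≠ y) := by simp
      rw [hstep, ih y runs (k+1) (by omega) hs.of_cons hyle, hfil, tail_map_count]
      congr 2
      push_cast [List.count_cons]
      simp
      omega
    · have hpy : ¬ p = y := fun h => hyp h.symm
      have hstep : favStep (runs, k, some p) y = (runs ++ [k], 1, some y) := by
        simp [favStep, hk, hpy]
      have hpnot : p ∉ y :: ys := by
        intro hmem
        rcases List.mem_cons.mp hmem with h | h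
        · exact hpy h
        · exact hyp (le_antisymm (hp y (by simp)) (hyle p h)).symm
      have hcnt0 : ((y :: ys).count p : Int) = 0 := by
        simp [List.count_eq_zero_of_not_mem hpnot]
      have hfil : (y :: ys).filter (fun x => x ≠ p) = y :: ys := by
        apply List.filter_eq_self.mpr
        intro a ha
        simp only [ne_eq, decide_eq_true_eq]
        intro h; subst h; exact hpnot ha
      rw [hstep, ih y (runs ++ [k]) 1 (by omega) hs.of_cons hyle, hfil, hcnt0,
        ofList_cons, List.map_cons, tail_map_count]
      have hhead : ((y :: ys).count y : Int) = 1 + (ys.count y : Int) := by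
        push_cast [List.count_cons]
        simp
        omega
      rw [hhead]
      simp

-- B's runs list: one run length per distinct element of the sorted list
lemma favB_runs (s : List String) (hs : s.Pairwise (· ≤ ·)) :
    (fun st => if 0 < st.2.1 then st.1 ++ [st.2.1] else st.1)
        (s.foldl favStep (([] : List Int), (0 : Int), (none : Option String)))
      = (PySem.Set.ofList s).map (fun x => (s.count x : Int)) := by
  cases s with
  | nil => rfl
  | cons x xs =>
    have hyle : ∀ z ∈ xs, x ≤ z := (List.pairwise_cons.mp hs).1
    have hstep : favStep ([], 0, none) x = ([], 1, some x) := by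
      simp [favStep]
    show finishRuns _ = _
    rw [List.foldl_cons, hstep, favB_go xs x [] 1 (by omega) hs.of_cons hyle,
      ofList_cons, List.map_cons, tail_map_count]
    have hhead : ((x :: xs).count x : Int) = 1 + (xs.count x : Int) := by
      push_cast [List.count_cons]
      simp
      omega
    rw [hhead]
    simp

-- the two count lists are permutations of each other
lemma counts_perm (inputt : List String) :
    ((PySem.Set.ofList inputt).map (fun k => (inputt.count k : Int))).Perm
      ((PySem.Set.ofList (PySem.List.sorted inputt (fun x => x) false)).map
        (fun k => ((PySem.List.sorted inputt (fun x => x) false).count k : Int))) := by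
  have hperm : (PySem.List.sorted inputt (fun x => x) false).Perm inputt :=
    PySem.List.sorted_perm inputt (fun x => x) false
  have hsets : (PySem.Set.ofList inputt).Perm
      (PySem.Set.ofList (PySem.List.sorted inputt (fun x => x) false)) := by
    rw [List.perm_ext_iff_of_nodup (PySem.Set.nodup_ofList _) (PySem.Set.nodup_ofList _)]
    intro a
    rw [PySem.Set.mem_ofList, PySem.Set.mem_ofList]
    exact (hperm.mem_iff).symm
  have hmap := hsets.map (fun k => (inputt.count k : Int))
  refine hmap.trans (List.Perm.of_eq ?_)
  apply List.map_congr_left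
  intro x _
  rw [hperm.count_eq]

lemma max?_eq_of_perm (l l' : List Int) (h : l.Perm l') :
    PySem.List.max? l (fun x => x) = PySem.List.max? l' (fun x => x) := by
  cases hl : PySem.List.max? l (fun x => x) with
  | none =>
    have h0 : l = [] := (PySem.List.max?_eq_none_iff ..).mp hl
    have h0' : l' = [] := (h0 ▸ h).symm.eq_nil
    rw [(PySem.List.max?_eq_none_iff ..).mpr h0']
  | some m =>
    cases hl' : PySem.List.max? l' (fun x => x) with
    | none =>
      have h0' : l' = [] := (PySem.List.max?_eq_none_iff ..).mp hl'
      have h0 : l = [] := (h0' ▸ h).eq_nil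
      rw [h0, (PySem.List.max?_eq_none_iff ..).mpr rfl] at hl
      exact absurd hl (by simp)
    | some m' =>
      have hm : m ∈ l := PySem.List.max?_mem hl
      have hm' : m' ∈ l' := PySem.List.max?_mem hl'
      have h1 : m ≤ m' := PySem.List.max?_isMax hl' m (h.mem_iff.mp hm)
      have h2 : m' ≤ m := PySem.List.max?_isMax hl m' (h.mem_iff.mpr hm')
      rw [le_antisymm h1 h2]

-- A's 0/1-sum is a count
lemma sum_ite_eq_count (l : List Int) (m : Int) :
    (l.map (fun c => if c = m then (1 : Int) else 0)).sum = (l.count m : Int) := by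
  have h := PySem.List.sum_map_ite_one_zero (fun c => c == m) l
  simp only [beq_iff_eq] at h
  rw [h, List.count_eq_countP]

-- ===== VERDICT (by name: the statement is the Claim_ definition above) =====
theorem fav_count_spec : Claim_equal_fav_count := by
  intro n inputt _ _
  unfold Spec_fav_count fav_count fav_count_alt
  have hpair : (PySem.List.sorted inputt (fun x => x) false).Pairwise (· ≤ ·) := by
    have := PySem.List.sorted_pairwise inputt (fun x => x)
    simpa using this
  simp only [favA_dict_eq_counter, favA_values, favB_runs _ hpair]
  rw [max?_eq_of_perm _ _ (counts_perm inputt)]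
  cases hmr : PySem.List.max? ((PySem.Set.ofList (PySem.List.sorted inputt (fun x => x) false)).map
      (fun k => ((PySem.List.sorted inputt (fun x => x) false).count k : Int))) (fun x => x) with
  | none => rfl
  | some m =>
    simp only
    rw [sum_ite_eq_count, (counts_perm inputt).count_eq]
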